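-- pv_equiv track=rewrite | github.com/Yash1hi/112TermProject | createPokemon.py | makeListFromString
-- ===== SOURCE A (Python) =====
-- def makeListFromString(s):
--     isWord = False
--     result = []
--     currentWord = ""
--     for c in s:
--         if isWord:
--             currentWord += c
--
--         if c == "," and isWord:
--             result.append(currentWord[2:-2])
--             currentWord = ""
--             isWord = not isWord
--         elif c == ",":
--             isWord = not isWord
--     return result
-- ===== SOURCE B (Python) =====
-- def makeListFromString(s):
--     segs = s.split(',')
--     return [segs[i][2:-1] for i in range(1, len(segs) - 1, 2)]
-- ===== Notes on version B (the rewrite author's own statement) =====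
-- stated objective: faster
-- what changed: Replaced the char-by-char boolean-toggle state machine that accumulates a currentWord buffer with one comma split followed by a stride-2 slice comprehension over the odd-indexed fields.
import Mathlib
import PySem

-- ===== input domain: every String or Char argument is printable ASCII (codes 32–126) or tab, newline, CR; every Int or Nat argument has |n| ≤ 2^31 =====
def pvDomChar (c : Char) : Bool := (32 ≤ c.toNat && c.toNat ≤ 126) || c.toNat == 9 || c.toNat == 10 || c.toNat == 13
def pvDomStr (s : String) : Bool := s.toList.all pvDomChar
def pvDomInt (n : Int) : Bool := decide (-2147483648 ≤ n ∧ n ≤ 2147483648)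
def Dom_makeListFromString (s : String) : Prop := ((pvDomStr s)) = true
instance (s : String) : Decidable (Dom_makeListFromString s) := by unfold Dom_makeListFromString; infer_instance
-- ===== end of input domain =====

-- B replaces A's char-by-char toggle state machine by one comma split plus a stride-2 slice
-- comprehension over the odd-indexed fields (constant-factor faster in a timing run).

-- ===== PORT A =====
-- the loop body of A; currentWord is tracked as its list of code points (PySem.Chars)
def pvStepA (st : Bool × List String × List Char) (c : Char) : Bool × List String × List Char :=
  let cw := if st.1 then st.2.2 ++ [c] else st.2.2
  if c = ',' ∧ st.1 then
    (!st.1, st.2.1 ++ [String.ofList (PySem.Chars.slice cw (some 2) (some (-2)))], [])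
  else if c = ',' then
    (!st.1, st.2.1, cw)
  else
    (st.1, st.2.1, cw)

def makeListFromString (s : String) : List String :=
  (s.toList.foldl pvStepA (false, [], [])).2.1

-- ===== PORT B =====
def makeListFromString_alt (s : String) : List String :=
  let segs : List String := (PySem.Chars.splitOn s.toList [',']).map String.ofList
  (PySem.List.pyRange 1 ((segs.length : Int) - 1) 2).map
    (fun i => PySem.Str.slice (PySem.List.pyGetD segs i "") (some 2) (some (-1)))

-- ===== PRECONDITION & SPEC =====
def Spec_makeListFromString (s : String) (out : List String) : Prop := out = makeListFromString_alt s
instance (s : String) (out : List String) : Decidable (Spec_makeListFromString s out) := by unfold Spec_makeListFromString; infer_instance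

-- ===== CLAIM (what is proved, stated in full; the proofs are below) =====
def Claim_equal_makeListFromString : Prop := ∀ (s : String), Dom_makeListFromString s → Spec_makeListFromString s (makeListFromString s)

-- ===== LEMMAS AND PROOFS =====

-- how pvStepA acts, one case per Python branch
theorem pvStepA_comma_true (res : List String) (cw : List Char) :
    pvStepA (true, res, cw) ',' =
      (false, res ++ [String.ofList (PySem.Chars.slice (cw ++ [',']) (some 2) (some (-2)))], []) := by
  simp [pvStepA]

theorem pvStepA_comma_false (res : List String) (cw : List Char) :
    pvStepA (false, res, cw) ',' = (true, res, cw) := by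
  simp [pvStepA]

theorem pvStepA_other_true (c : Char) (hc : c ≠ ',') (res : List String) (cw : List Char) :
    pvStepA (true, res, cw) c = (true, res, cw ++ [c]) := by
  simp [pvStepA, hc]

theorem pvStepA_other_false (c : Char) (hc : c ≠ ',') (res : List String) (cw : List Char) :
    pvStepA (false, res, cw) c = (false, res, cw) := by
  simp [pvStepA, hc]

-- structural recursion form of splitting at commas
def pvSplit : List Char → List (List Char)
  | [] => [[]]
  | c :: rest =>
    if c = ',' then [] :: pvSplit rest
    else
      match pvSplit rest with
      | [] => [[c]]
      | x :: xs => (c :: x) :: xs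

theorem pvSplit_ne_nil (cs : List Char) : pvSplit cs ≠ [] := by
  cases cs with
  | nil => simp [pvSplit]
  | cons c rest =>
    simp only [pvSplit]
    split_ifs
    · simp
    · cases pvSplit rest <;> simp

theorem pvIsPrefix (c : Char) (rest : List Char) :
    ([','].isPrefixOf (c :: rest)) = (',' == c) := by
  simp [List.isPrefixOf]

theorem pvSplitOn_go_eq : ∀ (fuel : Nat) (cs cur : List Char) (acc : List (List Char)),
    cs.length < fuel →
    PySem.Chars.splitOn.go [','] fuel cs cur acc =
      acc.reverse ++ (match pvSplit cs with
        | [] => [cur.reverse]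
        | x :: xs => (cur.reverse ++ x) :: xs) := by
  intro fuel
  induction fuel with
  | zero => intro cs cur acc h; omega
  | succ fuel ih =>
    intro cs cur acc h
    cases cs with
    | nil => rw [PySem.Chars.splitOn.go.eq_def]; simp [pvSplit]
    | cons c rest =>
      rw [PySem.Chars.splitOn.go.eq_def]
      simp only [pvIsPrefix]
      by_cases hc : c = ','
      · subst hc
        simp only [BEq.rfl, if_pos]
        rw [show List.drop [','].length (',' :: rest) = rest from rfl]
        rw [ih rest [] (List.reverse cur :: acc) (by simp at h; omega)]
        have hs := pvSplit_ne_nil rest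
        cases hsp : pvSplit rest with
        | nil => exact absurd hsp hs
        | cons x xs => simp [pvSplit, hsp]
      · rw [if_neg (by simp; exact fun h' => hc h'.symm)]
        rw [ih rest (c :: cur) acc (by simp at h; omega)]
        have hs := pvSplit_ne_nil rest
        cases hsp : pvSplit rest with
        | nil => exact absurd hsp hs
        | cons x xs => simp [pvSplit, hsp, hc]

theorem pvSplitOn_comma (cs : List Char) :
    PySem.Chars.splitOn cs [','] = pvSplit cs := by
  unfold PySem.Chars.splitOn
  rw [pvSplitOn_go_eq (cs.length + 1) cs [] [] (by omega)]
  have hs := pvSplit_ne_nil cs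
  cases hsp : pvSplit cs with
  | nil => exact absurd hsp hs
  | cons x xs => simp

-- the word B extracts from one field
def pvSliceB (y : List Char) : String :=
  PySem.Str.slice (String.ofList y) (some 2) (some (-1))

-- A's slice of the field with its closing comma equals B's slice of the bare field
theorem pvSliceAB (y : List Char) :
    String.ofList (PySem.Chars.slice (y ++ [',']) (some 2) (some (-2))) = pvSliceB y := by
  unfold pvSliceB PySem.Str.slice
  congr 1
  simp only [PySem.Chars.slice_eq_listSlice, String.toList_ofList]
  rcases y with _ | ⟨a, _ | ⟨b, _ | ⟨c, t⟩⟩⟩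
  · rfl
  · norm_num [PySem.List.slice, PySem.List.clampIdx]
  · norm_num [PySem.List.slice, PySem.List.clampIdx]
  · simp only [PySem.List.slice, PySem.List.clampIdx, List.length_append, List.length_cons,
      List.length_nil]
    norm_num
    rw [if_neg (by omega), if_neg (by omega)]
    rw [show (2:Int).toNat = 2 from rfl]
    have e1 : min 2 (t.length + 1 + 1 + 1 + 1) = 2 := by omega
    have e2 : ((t.length : Int) + 1 + 1 + 1 + 1 + -2).toNat = t.length + 2 := by omega
    have e3 : min 2 (t.length + 1 + 1 + 1) = 2 := by omega
    have e4 : ((t.length : Int) + 1 + 1).toNat = t.length + 2 := by omega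
    rw [e1, e2, e3, e4]
    simp only [Nat.add_sub_cancel, List.drop_succ_cons, List.drop_zero]
    show List.take t.length ((c :: t) ++ [',']) = List.take t.length (c :: t)
    rw [List.take_append_of_le_length (by simp)]

-- the list of words both programs produce, as a recursion over the comma-fields
def pvG : List (List Char) → List String
  | _ :: y :: rest => if rest.isEmpty then [] else pvSliceB y :: pvG rest
  | _ => []

-- A's result when the loop is inside a field with isWord set and accumulator cw
def pvH (cw : List Char) : List (List Char) → List String
  | y :: rest =>
    if rest.isEmpty then []
    else String.ofList (PySem.Chars.slice (cw ++ y ++ [',']) (some 2) (some (-2))) :: pvG rest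
  | [] => []

theorem pvG_indep (a b : List Char) (t : List (List Char)) :
    pvG (a :: t) = pvG (b :: t) := by
  cases t <;> simp [pvG]

theorem pvG_eq_pvH_nil (x : List Char) (t : List (List Char)) :
    pvG (x :: t) = pvH [] t := by
  cases t with
  | nil => simp [pvG, pvH]
  | cons y r =>
    simp only [pvG, pvH, List.nil_append]
    rw [pvSliceAB]

theorem pvFoldA_spec : ∀ (cs : List Char) (res : List String) (cw : List Char),
    ((cs.foldl pvStepA (false, res, [])).2.1 = res ++ pvG (pvSplit cs)) ∧
    ((cs.foldl pvStepA (true, res, cw)).2.1 = res ++ pvH cw (pvSplit cs)) := by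
  intro cs
  induction cs with
  | nil => intro res cw; simp [pvSplit, pvG, pvH]
  | cons c rest ih =>
    intro res cw
    constructor
    · by_cases hc : c = ','
      · subst hc
        simp only [List.foldl_cons, pvStepA_comma_false]
        rw [(ih res []).2]
        simp only [pvSplit, if_true]
        rw [pvG_eq_pvH_nil]
      · simp only [List.foldl_cons, pvStepA_other_false c hc]
        rw [(ih res []).1]
        have hs := pvSplit_ne_nil rest
        cases hsp : pvSplit rest with
        | nil => exact absurd hsp hs
        | cons x xs =>
          simp only [pvSplit, if_neg hc, hsp]
          rw [pvG_indep (c :: x) x]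
    · by_cases hc : c = ','
      · subst hc
        simp only [List.foldl_cons, pvStepA_comma_true]
        rw [(ih (res ++ [String.ofList (PySem.Chars.slice (cw ++ [',']) (some 2) (some (-2)))]) []).1]
        have hs := pvSplit_ne_nil rest
        simp only [pvSplit, if_true]
        cases hsp : pvSplit rest with
        | nil => exact absurd hsp hs
        | cons x xs =>
          simp only [pvH, List.isEmpty_cons, List.append_nil]
          rw [if_neg (by simp)]
          simp [List.append_assoc]
      · simp only [List.foldl_cons, pvStepA_other_true c hc]
        rw [(ih res (cw ++ [c])).2]
        have hs := pvSplit_ne_nil rest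
        cases hsp : pvSplit rest with
        | nil => exact absurd hsp hs
        | cons x xs =>
          simp only [pvSplit, if_neg hc, hsp]
          cases xs with
          | nil => simp [pvH]
          | cons z zs =>
            simp only [pvH, List.isEmpty_cons]
            rw [if_neg (by simp), if_neg (by simp)]
            have : cw ++ (c :: x) = (cw ++ [c]) ++ x := by simp
            rw [this]

-- pyRange with step 2: nil, cons, shift
theorem pvRange2_nil (a b : Int) (h : b ≤ a) : PySem.List.pyRange a b 2 = [] := by
  rw [PySem.List.pyRange_of_pos a b (by norm_num)]
  rw [if_neg (by omega)]
  simp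

theorem pvRange2_cons (a b : Int) (h : a < b) :
    PySem.List.pyRange a b 2 = a :: PySem.List.pyRange (a + 2) b 2 := by
  rw [PySem.List.pyRange_of_pos a b (by norm_num), PySem.List.pyRange_of_pos (a+2) b (by norm_num)]
  rw [if_pos h]
  by_cases h2 : a + 2 < b
  · rw [if_pos h2]
    have hcount : ((b - a + 2 - 1) / 2).toNat = ((b - (a+2) + 2 - 1) / 2).toNat + 1 := by omega
    rw [hcount, List.range_succ_eq_map]
    simp only [List.map_cons, List.map_map, Nat.cast_zero, mul_zero, add_zero]
    congr 1
    refine List.map_congr_left ?_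
    intro k _
    simp only [Function.comp_apply, Nat.succ_eq_add_one]
    push_cast
    ring
  · rw [if_neg h2]
    have hcount : ((b - a + 2 - 1) / 2).toNat = 1 := by omega
    simp [hcount]

theorem pvRange2_shift (a b : Int) :
    PySem.List.pyRange (a + 2) (b + 2) 2 = (PySem.List.pyRange a b 2).map (· + 2) := by
  rw [PySem.List.pyRange_of_pos a b (by norm_num), PySem.List.pyRange_of_pos (a+2) (b+2) (by norm_num)]
  simp only [add_lt_add_iff_right]
  split_ifs with h
  · have harg : b + 2 - (a + 2) = b - a := by ring
    rw [harg, List.map_map]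
    refine List.map_congr_left ?_
    intro k _
    simp only [Function.comp_apply]
    ring
  · simp

theorem pvGetD_cons2 (a b : String) (l : List String) (i : Int) (h : 0 ≤ i) (d : String) :
    PySem.List.pyGetD (a :: b :: l) (i + 2) d = PySem.List.pyGetD l i d := by
  simp only [PySem.List.pyGetD, PySem.List.pyGet?, PySem.List.pyIdx?]
  rw [if_pos (by omega : (0:Int) ≤ i + 2), if_pos h]
  by_cases hlt : i < (l.length : Int)
  · rw [if_pos (by simp; omega), if_pos hlt]
    have ht : (i + 2).toNat = i.toNat + 2 := by omega
    simp [ht]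
  · rw [if_neg (by simp; omega), if_neg hlt]
    simp

theorem pvMapB_eq : ∀ (segs : List (List Char)),
    (PySem.List.pyRange 1 ((segs.length : Int) - 1) 2).map
      (fun i => PySem.Str.slice (PySem.List.pyGetD (segs.map String.ofList) i "") (some 2) (some (-1)))
      = pvG segs
  | [] => by rw [pvRange2_nil _ _ (by simp)]; simp [pvG]
  | [x] => by rw [pvRange2_nil _ _ (by simp)]; simp [pvG]
  | [x, y] => by rw [pvRange2_nil _ _ (by norm_num)]; simp [pvG]
  | x :: y :: z :: rs => by
    have hlen : ((x :: y :: z :: rs).length : Int) - 1 = (((z :: rs).length : Int) - 1) + 2 := by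
      simp; ring
    rw [hlen, pvRange2_cons _ _ (by simp; omega)]
    rw [show (1 : Int) + 2 = 1 + 2 from rfl, pvRange2_shift 1 (((z :: rs).length : Int) - 1)]
    simp only [List.map_cons, List.map_map]
    rw [pvG.eq_def]
    simp only [List.isEmpty_cons]
    rw [if_neg (by simp)]
    congr 1
    · rw [PySem.List.pyGetD_ofNat']
      simp [pvSliceB, List.getD]
    · rw [← pvMapB_eq (z :: rs)]
      refine List.map_congr_left ?_
      intro i hi
      have hmem := (PySem.List.mem_pyRange_iff_of_pos (by norm_num : (0:Int) < 2) i).1 hi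
      simp only [Function.comp_apply, List.map_cons]
      rw [pvGetD_cons2 _ _ _ i (by omega)]

-- ===== VERDICT (by name: the statement is the Claim_ definition above) =====
theorem makeListFromString_spec : Claim_equal_makeListFromString := by
  intro s _
  unfold Spec_makeListFromString makeListFromString makeListFromString_alt
  rw [pvSplitOn_comma]
  rw [(pvFoldA_spec s.toList [] []).1]
  simp only [List.nil_append, List.length_map]
  rw [pvMapB_eq (pvSplit s.toList)]
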